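-- pv_equiv track=rewrite | github.com/pypi-data/pypi-mirror-395 | packages/motus-command/motus_command-0.3.0.tar.gz/motus_command-0.3.0/src/motus_command/ui/tui_utils.py | filter_events_by_type
-- ===== SOURCE A (Python) =====
-- from typing import Optional
--
-- def filter_events_by_type(
--     events: list[dict],
--     event_types: Optional[list[str]] = None,
--     exclude_types: Optional[list[str]] = None,
-- ) -> list[dict]:
--     """Filter events by type.
--
--     Args:
--         events: List of event dicts
--         event_types: Types to include (None = all)
--         exclude_types: Types to exclude
--
--     Returns:
--         Filtered event list
--     """
--     result = events
--
--     if event_types: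
--         result = [e for e in result if e.get("type") in event_types]
--
--     if exclude_types:
--         result = [e for e in result if e.get("type") not in exclude_types]
--
--     return result
-- ===== SOURCE B (Python) =====
-- from typing import Optional
--
-- def filter_events_by_type(
--     events: list[dict],
--     event_types: Optional[list[str]] = None,
--     exclude_types: Optional[list[str]] = None,
-- ) -> list[dict]:
--     """One explicit loop with an accumulator; the keep/drop decision per event
--     type is computed once and memoized in a dict, so the list-membership scans
--     run once per DISTINCT type instead of once per event."""
--     decision_cache: dict = {}
--     result: list[dict] = []
--     for e in events:
--         t = e.get("type")
--         if t not in decision_cache: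
--             decision_cache[t] = (
--                 (not event_types or t in event_types)
--                 and (not exclude_types or t not in exclude_types)
--             )
--         if decision_cache[t]:
--             result.append(e)
--     return result
-- ===== Notes on version B (the rewrite author's own statement) =====
-- stated objective: faster
-- what changed: Replaces A's two staged filter comprehensions with one explicit accumulator loop that memoizes the keep/drop verdict per distinct event type in a dict, so the include/exclude list-membership scans run once per distinct type instead of once per event.
import Mathlib
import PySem

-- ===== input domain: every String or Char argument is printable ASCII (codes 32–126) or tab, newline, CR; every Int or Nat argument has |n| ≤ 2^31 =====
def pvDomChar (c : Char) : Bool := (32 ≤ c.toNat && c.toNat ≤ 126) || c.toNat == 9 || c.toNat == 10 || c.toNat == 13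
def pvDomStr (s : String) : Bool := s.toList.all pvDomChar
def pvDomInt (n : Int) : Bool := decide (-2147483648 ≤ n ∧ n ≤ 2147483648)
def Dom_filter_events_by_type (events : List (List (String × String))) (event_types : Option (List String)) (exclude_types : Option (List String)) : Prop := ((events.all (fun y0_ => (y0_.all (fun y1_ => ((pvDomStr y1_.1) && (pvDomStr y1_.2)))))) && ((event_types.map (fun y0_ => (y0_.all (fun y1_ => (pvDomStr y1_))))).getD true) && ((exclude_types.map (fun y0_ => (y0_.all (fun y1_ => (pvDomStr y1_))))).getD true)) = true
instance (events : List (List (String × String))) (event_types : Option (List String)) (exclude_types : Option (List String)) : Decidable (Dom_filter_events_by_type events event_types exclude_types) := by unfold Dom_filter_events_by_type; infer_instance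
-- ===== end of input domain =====

-- B replaces A's two staged filter passes by one accumulator loop that memoizes the keep/drop
-- verdict per distinct event type in a dict (objective: alternative).


-- ===== PORT A =====
-- e.get("type") on a dict built from the pair list (last value wins on duplicate keys, as in Python's dict)
def pvGetType (e : List (String × String)) : Option String := (PySem.Dict.ofList e).get? "type"

-- Python truthiness of an Optional[list[str]]
def pvTruthy (o : Option (List String)) : Bool := match o with | none => false | some l => !l.isEmpty

-- t in l for t : Optional[str] (None is in no list of strings)
def pvOptMem (t : Option String) (l : List String) : Bool :=
  match t with | some s => l.contains s | none => false

def filter_events_by_type (events : List (List (String × String))) (event_types : Option (List String)) (exclude_types : Option (List String)) : List (List (String × String)) :=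
  let result := events
  let result := if pvTruthy event_types then result.filter (fun e => pvOptMem (pvGetType e) (event_types.getD [])) else result
  let result := if pvTruthy exclude_types then result.filter (fun e => !pvOptMem (pvGetType e) (exclude_types.getD [])) else result
  result

-- ===== PORT B =====
-- the keep/drop decision B computes (and memoizes) for one type value
def pvDecideB (event_types exclude_types : Option (List String)) (t : Option String) : Bool :=
  (!pvTruthy event_types || pvOptMem t (event_types.getD []))
  && (!pvTruthy exclude_types || !pvOptMem t (exclude_types.getD []))

-- one iteration of B's loop: memoize the decision for t, then append e if it says keep
def pvStepB (event_types exclude_types : Option (List String))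
    (st : PySem.Dict (Option String) Bool × List (List (String × String)))
    (e : List (String × String)) :
    PySem.Dict (Option String) Bool × List (List (String × String)) :=
  let t := pvGetType e
  let cache := if st.1.contains t then st.1 else st.1.insert t (pvDecideB event_types exclude_types t)
  let result := if cache.getD t false then st.2 ++ [e] else st.2
  (cache, result)

def filter_events_by_type_alt (events : List (List (String × String))) (event_types : Option (List String)) (exclude_types : Option (List String)) : List (List (String × String)) :=
  (events.foldl (pvStepB event_types exclude_types) (PySem.Dict.empty, [])).2

-- ===== PRECONDITION & SPEC =====
def Spec_filter_events_by_type (events : List (List (String × String))) (event_types : Option (List String)) (exclude_types : Option (List String)) (out : List (List (String × String))) : Prop := out = filter_events_by_type_alt events event_types exclude_types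
instance (events : List (List (String × String))) (event_types : Option (List String)) (exclude_types : Option (List String)) (out : List (List (String × String))) : Decidable (Spec_filter_events_by_type events event_types exclude_types out) := by unfold Spec_filter_events_by_type; infer_instance

-- ===== CLAIM =====
def Claim_equal_filter_events_by_type : Prop := ∀ (events : List (List (String × String))) (event_types : Option (List String)) (exclude_types : Option (List String)), Dom_filter_events_by_type events event_types exclude_types → Spec_filter_events_by_type events event_types exclude_types (filter_events_by_type events event_types exclude_types)

-- ===== LEMMAS AND PROOFS =====

-- cache invariant: every memoized verdict is the verdict pvDecideB would compute
def pvCacheOK (et ex : Option (List String)) (d : PySem.Dict (Option String) Bool) : Prop :=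
  ∀ k b, d.get? k = some b → b = pvDecideB et ex k

theorem pvFoldB_eq_filter (et ex : Option (List String)) :
    ∀ (evs : List (List (String × String))) (d : PySem.Dict (Option String) Bool)
      (res : List (List (String × String))), pvCacheOK et ex d →
      (evs.foldl (pvStepB et ex) (d, res)).2
        = res ++ evs.filter (fun e => pvDecideB et ex (pvGetType e)) := by
  intro evs
  induction evs with
  | nil => intro d res _; simp
  | cons e rest ih =>
    intro d res hd
    have hstep : pvStepB et ex (d, res) e =
        ((if d.contains (pvGetType e) then d else d.insert (pvGetType e) (pvDecideB et ex (pvGetType e))),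
         (if pvDecideB et ex (pvGetType e) then res ++ [e] else res)) := by
      unfold pvStepB
      by_cases hc : d.contains (pvGetType e)
      · -- already memoized: the stored value is the verdict
        have hsome : (d.get? (pvGetType e)).isSome := by
          rw [← PySem.Dict.contains_eq_isSome_get?]; exact hc
        obtain ⟨b, hb⟩ := Option.isSome_iff_exists.mp hsome
        have := hd _ _ hb
        simp [hc, PySem.Dict.getD_eq_get?_getD, hb, ← this]
      · simp [hc, PySem.Dict.getD_insert_self]
    have hd' : pvCacheOK et ex (if d.contains (pvGetType e) then d else d.insert (pvGetType e) (pvDecideB et ex (pvGetType e))) := by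
      split
      · exact hd
      · intro k b hb
        rw [PySem.Dict.get?_insert] at hb
        split at hb
        · cases hb; simp [*]
        · exact hd _ _ hb
    rw [List.foldl_cons, hstep, ih _ _ hd']
    by_cases hdec : pvDecideB et ex (pvGetType e) = true <;> simp [hdec]

-- ===== VERDICT =====
theorem filter_events_by_type_spec : Claim_equal_filter_events_by_type := by
  intro events et ex _
  unfold Spec_filter_events_by_type filter_events_by_type filter_events_by_type_alt
  rw [pvFoldB_eq_filter et ex events PySem.Dict.empty [] (by intro k b hb; simp [PySem.Dict.get?_empty] at hb)]
  unfold pvDecideB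
  cases het : pvTruthy et <;> cases hex : pvTruthy ex <;>
    simp [List.filter_filter, Bool.and_comm]
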